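-- pv_equiv track=rewrite | github.com/MDiakhate12/edi-parser | python/vessel_stow_kpi.py | get_lists_bay_subbay
-- ===== SOURCE A (Python) =====
-- def get_lists_bay_subbay(d_sb_capacities):
--
--     l_cols_bay_subbay = []
--
--     l_bays = []
--     l_subbays = []
--
--     # add empty subbay for garbage ot loadlist
--     l_subbays.append('')
--     l_cols_bay_subbay.append((-1,0))
--
--     for subbay in d_sb_capacities.keys():
--         l_subbays.append(subbay)
--     l_subbays.sort()
--
--     ix_bay = 0
--     ix_subbay = 1 # '' already added
--     prev_bay = ''
--     # starting at 1 for garbage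
--     for subbay in l_subbays[1:]:
--         bay = subbay[0:-2]
--         if bay != prev_bay:
--             l_bays.append(bay)
--             l_cols_bay_subbay.append((ix_bay, -1))
--             ix_bay += 1
--             prev_bay = bay
--         l_cols_bay_subbay.append((-1, ix_subbay))
--         ix_subbay += 1
--
--     return l_bays, l_subbays, l_cols_bay_subbay
-- ===== SOURCE B (Python) =====
-- def get_lists_bay_subbay(d_sb_capacities):
--     # '' garbage sentinel heads the sorted subbay list and anchors the first
--     # (bay-less) group; everything else is derived from a run-length encoding
--     # of the bay prefixes, not from a stateful scan.
--     l_subbays = [''] + sorted(d_sb_capacities)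
--     runs = []  # (bay_prefix, run_length) of maximal consecutive groups
--     for s in l_subbays:
--         b = s[:-2]
--         if runs and runs[-1][0] == b:
--             runs[-1] = (b, runs[-1][1] + 1)
--         else:
--             runs.append((b, 1))
--     l_bays = [b for b, _ in runs[1:]]
--     l_cols_bay_subbay = []
--     j = 0
--     for ix, (b, k) in enumerate(runs):
--         if ix > 0:
--             l_cols_bay_subbay.append((ix - 1, -1))
--         l_cols_bay_subbay.extend((-1, j + i) for i in range(k))
--         j += k
--     return l_bays, l_subbays, l_cols_bay_subbay
-- ===== Notes on version B (the rewrite author's own statement) =====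
-- stated objective: alternative
-- what changed: A threads prev_bay/ix_bay/ix_subbay through one stateful scan; B run-length-encodes the sentinel-prefixed sorted subbay list by bay prefix, reads l_bays off the encoding's tail, and generates the column pairs arithmetically from the run lengths in a separate emit stage.
import Mathlib
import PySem

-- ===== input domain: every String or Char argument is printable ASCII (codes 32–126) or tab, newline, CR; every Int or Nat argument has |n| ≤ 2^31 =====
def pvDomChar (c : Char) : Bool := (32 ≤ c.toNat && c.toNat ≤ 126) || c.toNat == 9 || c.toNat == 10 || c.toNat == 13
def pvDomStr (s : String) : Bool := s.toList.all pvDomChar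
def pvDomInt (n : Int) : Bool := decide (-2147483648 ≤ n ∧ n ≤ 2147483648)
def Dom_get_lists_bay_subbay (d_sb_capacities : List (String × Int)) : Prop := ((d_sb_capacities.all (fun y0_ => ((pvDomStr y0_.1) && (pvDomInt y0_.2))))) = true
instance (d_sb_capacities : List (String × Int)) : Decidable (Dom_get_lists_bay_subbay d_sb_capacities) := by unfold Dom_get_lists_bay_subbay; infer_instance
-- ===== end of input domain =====

-- B replaces A's single stateful scan (prev_bay/ix_bay/ix_subbay threaded together) by a
-- staged decomposition: run-length-encode the sentinel-prefixed sorted subbay list by bay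
-- prefix, read l_bays off the encoding's tail, and generate the column pairs arithmetically
-- from the run lengths (objective: alternative; same cost).

-- ===== PORT A =====
-- loop body of A's single for-loop: state (l_bays, l_cols_bay_subbay, ix_bay, ix_subbay, prev_bay)
def pvStepA : (List String × List (Int × Int) × Int × Int × String) → String →
    List String × List (Int × Int) × Int × Int × String
  | (l_bays, l_cols, ix_bay, ix_subbay, prev_bay), subbay =>
    let bay := PySem.Str.slice subbay (some 0) (some (-2))
    if bay != prev_bay then
      (l_bays ++ [bay], (l_cols ++ [(ix_bay, -1)]) ++ [(-1, ix_subbay)], ix_bay + 1, ix_subbay + 1, bay)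
    else
      (l_bays, l_cols ++ [(-1, ix_subbay)], ix_bay, ix_subbay + 1, prev_bay)

def get_lists_bay_subbay (d_sb_capacities : List (String × Int)) : List String × List String × (List (Int × Int)) :=
  -- l_subbays = [''] + keys, then .sort()
  let l_subbays := PySem.List.sorted ("" :: (PySem.Dict.ofList d_sb_capacities).keys) (fun s => s) false
  -- for subbay in l_subbays[1:]: …
  let st := (PySem.List.slice l_subbays (some 1) none).foldl pvStepA ([], [((-1 : Int), (0 : Int))], 0, 1, "")
  (st.1, l_subbays, st.2.1)

-- ===== PORT B =====
-- body of B's run-length-encoding loop (runs[-1] update / append)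
def pvRleStep (runs : List (String × Int)) (b : String) : List (String × Int) :=
  match runs.getLast? with
  | some (b', c) => if b' == b then runs.dropLast ++ [(b, c + 1)] else runs ++ [(b, 1)]
  | none => runs ++ [(b, 1)]

-- body of B's emit loop over enumerate(runs): state (l_cols_bay_subbay, j)
def pvEmitStep (st : List (Int × Int) × Int) (p : Int × (String × Int)) : List (Int × Int) × Int :=
  let cols := if p.1 > 0 then st.1 ++ [(p.1 - 1, (-1 : Int))] else st.1
  (cols ++ (PySem.List.pyRange 0 p.2.2 1).map (fun i => ((-1 : Int), st.2 + i)), st.2 + p.2.2)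

def get_lists_bay_subbay_alt (d_sb_capacities : List (String × Int)) : List String × List String × (List (Int × Int)) :=
  let l_subbays := "" :: PySem.List.sorted ((PySem.Dict.ofList d_sb_capacities).keys) (fun s => s) false
  let runs := l_subbays.foldl (fun rs s => pvRleStep rs (PySem.Str.slice s (some 0) (some (-2)))) []
  let l_bays := (PySem.List.slice runs (some 1) none).map (fun r => r.1)
  let st := (PySem.List.enumerate runs 0).foldl pvEmitStep ([], 0)
  (l_bays, l_subbays, st.1)

-- ===== PRECONDITION & SPEC =====
def Spec_get_lists_bay_subbay (d_sb_capacities : List (String × Int)) (out : List String × List String × (List (Int × Int))) : Prop := out = get_lists_bay_subbay_alt d_sb_capacities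
instance (d_sb_capacities : List (String × Int)) (out : List String × List String × (List (Int × Int))) : Decidable (Spec_get_lists_bay_subbay d_sb_capacities out) := by unfold Spec_get_lists_bay_subbay; infer_instance

-- ===== CLAIM (what is proved, stated in full; the proofs are below) =====
def Claim_equal_get_lists_bay_subbay : Prop := ∀ (d_sb_capacities : List (String × Int)), Dom_get_lists_bay_subbay d_sb_capacities → Spec_get_lists_bay_subbay d_sb_capacities (get_lists_bay_subbay d_sb_capacities)

-- ===== LEMMAS AND PROOFS =====

-- common emit skeleton (A's loop, recursively): given the bay prefixes in order,
-- the bay list and the column list after the sentinel's (-1,0)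
def pvEmit : String → Int → Int → List String → List String × List (Int × Int)
  | _, _, _, [] => ([], [])
  | prev, ixb, ixs, b :: bs =>
    if b != prev then
      let p := pvEmit b (ixb + 1) (ixs + 1) bs
      (b :: p.1, (ixb, -1) :: (-1, ixs) :: p.2)
    else
      let p := pvEmit prev ixb (ixs + 1) bs
      (p.1, (-1, ixs) :: p.2)

-- recursive run-length encoding with a pending run (b, c)
def pvRleAux : String → Int → List String → List (String × Int)
  | b, c, [] => [(b, c)]
  | b, c, x :: xs => if x == b then pvRleAux b (c + 1) xs else (b, c) :: pvRleAux x 1 xs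

-- B's emit loop, recursively over the runs
def pvEmitCols : Int → Int → List (String × Int) → List (Int × Int)
  | _, _, [] => []
  | ix, j, (_, k) :: rs =>
    (if ix > 0 then [(ix - 1, (-1 : Int))] else []) ++
      (PySem.List.pyRange 0 k 1).map (fun i => ((-1 : Int), j + i)) ++ pvEmitCols (ix + 1) (j + k) rs

theorem pv_foldA_spec (cs : List String) :
    ∀ (xb : List String) (xc : List (Int × Int)) (ixb ixs : Int) (prev : String),
    (cs.foldl pvStepA (xb, xc, ixb, ixs, prev)).1 =
      xb ++ (pvEmit prev ixb ixs (cs.map (fun s => PySem.Str.slice s (some 0) (some (-2))))).1 ∧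
    (cs.foldl pvStepA (xb, xc, ixb, ixs, prev)).2.1 =
      xc ++ (pvEmit prev ixb ixs (cs.map (fun s => PySem.Str.slice s (some 0) (some (-2))))).2 := by
  induction cs with
  | nil => intro xb xc ixb ixs prev; simp [pvEmit]
  | cons c cs ih =>
    intro xb xc ixb ixs prev
    simp only [List.foldl_cons, List.map_cons, pvStepA, pvEmit]
    by_cases h : (PySem.Str.slice c (some 0) (some (-2))) != prev
    · simp only [if_pos h]
      obtain ⟨h1, h2⟩ := ih (xb ++ [PySem.Str.slice c (some 0) (some (-2))])
        ((xc ++ [(ixb, -1)]) ++ [(-1, ixs)]) (ixb + 1) (ixs + 1) (PySem.Str.slice c (some 0) (some (-2)))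
      rw [h1, h2]
      constructor <;> simp
    · simp only [if_neg h]
      obtain ⟨h1, h2⟩ := ih xb (xc ++ [(-1, ixs)]) ixb (ixs + 1) prev
      rw [h1, h2]
      constructor <;> simp

theorem pv_sorted_cons_empty (xs : List String) :
    PySem.List.sorted ("" :: xs) (fun s => s) false =
      "" :: PySem.List.sorted xs (fun s => s) false := by
  apply PySem.List.sorted_id_eq_of_perm_of_pairwise
  · exact (PySem.List.sorted_perm xs (fun s => s) false).cons ""
  · refine List.pairwise_cons.2 ⟨?_, ?_⟩
    · intro y _
      refine le_of_not_gt ?_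
      intro hlt
      rw [String.lt_iff_toList_lt] at hlt
      simp at hlt
    · exact PySem.List.sorted_pairwise xs (fun s => s)

-- B's foldl run-length encoding equals the recursive one
theorem pv_rle_foldl (bs : List String) :
    ∀ (rs : List (String × Int)) (b : String) (c : Int),
    bs.foldl pvRleStep (rs ++ [(b, c)]) = rs ++ pvRleAux b c bs := by
  induction bs with
  | nil => intro rs b c; simp [pvRleAux]
  | cons x xs ih =>
    intro rs b c
    simp only [List.foldl_cons, pvRleStep, List.getLast?_concat, pvRleAux]
    by_cases h : b == x
    · have hx : x = b := (eq_of_beq h).symm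
      subst hx
      simp only [List.dropLast_concat, beq_self_eq_true, if_true]
      exact ih rs x (c + 1)
    · have hbx : b ≠ x := fun e => h (by simp [e])
      have hxb : (x == b) = false := beq_eq_false_iff_ne.mpr (fun e => hbx e.symm)
      rw [if_neg h, if_neg (by simp [hxb])]
      rw [ih (rs ++ [(b, c)]) x 1, List.append_assoc]
      simp

-- B's foldl over enumerate(runs) equals the recursive column emitter
theorem pv_emit_foldl (R : List (String × Int)) :
    ∀ (ix : Int) (xc : List (Int × Int)) (j : Int),
    ((PySem.List.enumerate R ix).foldl pvEmitStep (xc, j)).1 = xc ++ pvEmitCols ix j R := by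
  induction R with
  | nil => intro ix xc j; simp [PySem.List.enumerate_nil, pvEmitCols]
  | cons r rs ih =>
    intro ix xc j
    rw [PySem.List.enumerate_cons]
    simp only [List.foldl_cons, pvEmitStep, pvEmitCols]
    by_cases h : ix > 0
    · simp only [if_pos h]
      rw [ih (ix + 1) _ (j + r.2)]
      simp [List.append_assoc]
    · simp only [if_neg h]
      rw [ih (ix + 1) _ (j + r.2)]
      simp [List.append_assoc]

-- the emitted columns of the run-length encoding are A's columns
theorem pv_emit_rle (bs : List String) :
    ∀ (b : String) (c ix j : Int), 0 ≤ c → 0 ≤ ix →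
    pvEmitCols ix j (pvRleAux b c bs) =
      (if ix > 0 then [(ix - 1, (-1 : Int))] else []) ++
        (PySem.List.pyRange 0 c 1).map (fun i => ((-1 : Int), j + i)) ++
        (pvEmit b ix (j + c) bs).2 := by
  induction bs with
  | nil => intro b c ix j _ _; simp [pvRleAux, pvEmitCols, pvEmit]
  | cons x xs ih =>
    intro b c ix j hc hix
    simp only [pvRleAux]
    by_cases h : x == b
    · have hx : x = b := eq_of_beq h
      subst hx
      simp only [beq_self_eq_true, if_true]
      rw [ih x (c + 1) ix j (by omega) hix]
      have hr : PySem.List.pyRange 0 (c + 1) 1 = PySem.List.pyRange 0 c 1 ++ [c] :=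
        PySem.List.pyRange_one_succ_right hc
      simp only [pvEmit, bne_self_eq_false, Bool.false_eq_true, if_false, hr, List.map_append]
      simp [List.append_assoc, add_assoc]
    · have hxb : (x == b) = false := by simpa using h
      rw [if_neg (by simp [hxb])]
      simp only [pvEmitCols]
      rw [ih x 1 (ix + 1) (j + c) (by omega) (by omega)]
      have hne : (x != b) = true := by simp [bne, hxb]
      have hr1 : PySem.List.pyRange 0 1 1 = [0] := by decide
      have h1 : ix + 1 > 0 := by omega
      simp only [pvEmit, hne, if_true, hr1, List.map_cons, List.map_nil, if_pos h1,
        add_sub_cancel_right]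
      simp [List.append_assoc, add_assoc]

-- the run prefixes are the pending bay followed by A's bay list
theorem pv_bays_rle (bs : List String) :
    ∀ (b : String) (c ix ixs : Int),
    (pvRleAux b c bs).map (fun r => r.1) = b :: (pvEmit b ix ixs bs).1 := by
  induction bs with
  | nil => intro b c ix ixs; simp [pvRleAux, pvEmit]
  | cons x xs ih =>
    intro b c ix ixs
    simp only [pvRleAux]
    by_cases h : x == b
    · have hx : x = b := eq_of_beq h
      subst hx
      simp only [beq_self_eq_true, if_true]
      rw [ih x (c + 1) ix (ixs + 1)]
      simp [pvEmit]
    · have hxb : (x == b) = false := by simpa using h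
      rw [if_neg (by simp [hxb])]
      have hne : (x != b) = true := by simp [bne, hxb]
      simp only [List.map_cons, ih x 1 (ix + 1) (ixs + 1), pvEmit, hne, if_true]

-- ===== VERDICT (by name: the statement is the Claim_ definition above) =====
theorem get_lists_bay_subbay_spec : Claim_equal_get_lists_bay_subbay := by
  intro d _
  unfold Spec_get_lists_bay_subbay get_lists_bay_subbay get_lists_bay_subbay_alt
  rw [pv_sorted_cons_empty]
  set cs := PySem.List.sorted ((PySem.Dict.ofList d).keys) (fun s => s) false with hcs
  dsimp only
  rw [PySem.List.slice_from_one, List.tail_cons]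
  set bs := cs.map (fun s => PySem.Str.slice s (some 0) (some (-2))) with hbs
  have hA := pv_foldA_spec cs [] [((-1 : Int), (0 : Int))] 0 1 ""
  rw [← hbs] at hA
  have hmapfold : ∀ (l : List String) (init : List (String × Int)),
      l.foldl (fun rs s => pvRleStep rs (PySem.Str.slice s (some 0) (some (-2)))) init
        = (l.map (fun s => PySem.Str.slice s (some 0) (some (-2)))).foldl pvRleStep init := by
    intro l init; rw [List.foldl_map]
  have hfold : ("" :: cs).foldl (fun rs s => pvRleStep rs (PySem.Str.slice s (some 0) (some (-2)))) []
      = pvRleAux "" 1 bs := by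
    rw [hmapfold]
    have hempty : PySem.Str.slice "" (some 0) (some (-2)) = "" := by decide
    simp only [List.map_cons, List.foldl_cons, ← hbs, hempty]
    have h0 : pvRleStep [] "" = [] ++ [("", (1 : Int))] := by rfl
    rw [h0, pv_rle_foldl bs [] "" 1, List.nil_append]
  rw [hfold]
  have hr1 : PySem.List.pyRange 0 1 1 = [0] := by decide
  refine Prod.ext ?_ (Prod.ext rfl ?_)
  · dsimp only
    rw [hA.1, List.nil_append, PySem.List.slice_from_one, List.map_tail,
      pv_bays_rle bs "" 1 0 1, List.tail_cons]
  · dsimp only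
    rw [hA.2, pv_emit_foldl (pvRleAux "" 1 bs) 0 [] 0, List.nil_append,
      pv_emit_rle bs "" 1 0 0 (by omega) (by omega)]
    simp [hr1]
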